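-- pv_equiv track=rewrite | github.com/TAMU-CPT/galaxy-tools | tools/blast/blast_to_gapped_gff3.py | _matchline_to_cigar
-- ===== SOURCE A (Python) =====
-- def _matchline_to_cigar(matchline):
--     cigar_line = []
--     last_char = matchline[0]
--     count = 0
--     for char in matchline:
--         if char == last_char:
--             count += 1
--         else:
--             cigar_line.append("%s%s" % (last_char, count))
--             count = 1
--         last_char = char
--     cigar_line.append("%s%s" % (last_char, count))
--     return " ".join(cigar_line)
-- ===== SOURCE B (Python) =====
-- def _matchline_to_cigar(matchline):
--     parts = []
--     i = 0
--     n = len(matchline)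
--     while i < n:
--         j = i
--         while j < n and matchline[j] == matchline[i]:
--             j += 1
--         parts.append("%s%s" % (matchline[i], j - i))
--         i = j
--     return " ".join(parts)
-- ===== Notes on version B (the rewrite author's own statement) =====
-- stated objective: alternative
-- what changed: Replaces the per-character last_char/count state machine with a two-pointer scan over run boundaries: for each run start, advance a second index to the run's end and emit one token per run.
-- outside the precondition, e.g. on _matchline_to_cigar(''): A raises IndexError, B returns ''
import Mathlib
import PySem

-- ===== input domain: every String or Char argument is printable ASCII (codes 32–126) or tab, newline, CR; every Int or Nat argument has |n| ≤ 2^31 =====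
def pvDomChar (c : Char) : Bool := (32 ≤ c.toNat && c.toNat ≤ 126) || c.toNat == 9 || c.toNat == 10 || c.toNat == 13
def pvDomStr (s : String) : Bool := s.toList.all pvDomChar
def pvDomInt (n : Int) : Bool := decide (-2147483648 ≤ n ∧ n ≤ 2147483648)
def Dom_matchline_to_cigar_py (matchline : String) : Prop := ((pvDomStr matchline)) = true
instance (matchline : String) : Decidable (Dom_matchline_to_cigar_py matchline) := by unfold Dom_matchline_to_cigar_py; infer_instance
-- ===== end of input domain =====

-- B run-length encodes by a two-pointer scan over run boundaries instead of A's last_char/count state machine (objective: alternative; same return value on nonempty input).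

-- ===== PORT A =====
-- "%s%s" % (c, n)
def pvFmt (c : Char) (n : Int) : String := String.ofList [c] ++ PySem.Int.toStr n

def matchline_to_cigar_py (matchline : String) : String :=
  match matchline.toList with
  | [] => ""   -- Python raises IndexError on matchline[0]; excluded by Pre_
  | c0 :: _ =>
    let st := matchline.toList.foldl
      (fun (acc : List String × Char × Int) char =>
        if char == acc.2.1 then (acc.1, char, acc.2.2 + 1)
        else (acc.1 ++ [pvFmt acc.2.1 acc.2.2], char, (1 : Int)))
      ([], c0, 0)
    PySem.Str.join " " (st.1 ++ [pvFmt st.2.1 st.2.2])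

-- ===== PORT B =====
-- inner while: advance j while equal to the run's first char; outer while: recurse on the rest
def pvRuns : List Char → List String
  | [] => []
  | c :: rest =>
    pvFmt c (1 + (rest.takeWhile (· == c)).length) :: pvRuns (rest.dropWhile (· == c))
termination_by l => l.length
decreasing_by
  simp only [List.length_cons]
  exact Nat.lt_succ_of_le (List.length_dropWhile_le _ _)

def matchline_to_cigar_py_alt (matchline : String) : String :=
  PySem.Str.join " " (pvRuns matchline.toList)

-- ===== PRECONDITION & SPEC =====
-- Pre_ excludes only the empty string, on which Python A raises IndexError.
def Pre_matchline_to_cigar_py (matchline : String) : Prop := matchline ≠ ""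
instance (matchline : String) : Decidable (Pre_matchline_to_cigar_py matchline) := by unfold Pre_matchline_to_cigar_py; infer_instance
def pvWitness_matchline_to_cigar_py : String := "||  x"

def Spec_matchline_to_cigar_py (matchline : String) (out : String) : Prop := out = matchline_to_cigar_py_alt matchline
instance (matchline : String) (out : String) : Decidable (Spec_matchline_to_cigar_py matchline out) := by unfold Spec_matchline_to_cigar_py; infer_instance

-- ===== CLAIM (what is proved, stated in full; the proofs are below) =====
def Claim_equal_matchline_to_cigar_py : Prop := ∀ (matchline : String), Dom_matchline_to_cigar_py matchline → Pre_matchline_to_cigar_py matchline → Spec_matchline_to_cigar_py matchline (matchline_to_cigar_py matchline)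

-- ===== LEMMAS AND PROOFS =====

-- reference run-length encoder from a pending (char, count) state
def pvRle (c : Char) (n : Int) : List Char → List String
  | [] => [pvFmt c n]
  | d :: rest => if d == c then pvRle c (n + 1) rest else pvFmt c n :: pvRle d 1 rest

-- A's fold, then the final append, equals acc ++ pvRle
theorem pvFold_eq (rest : List Char) : ∀ (acc : List String) (c : Char) (n : Int),
    (let st := rest.foldl
        (fun (acc : List String × Char × Int) char =>
          if char == acc.2.1 then (acc.1, char, acc.2.2 + 1)
          else (acc.1 ++ [pvFmt acc.2.1 acc.2.2], char, (1 : Int)))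
        (acc, c, n)
     st.1 ++ [pvFmt st.2.1 st.2.2]) = acc ++ pvRle c n rest := by
  induction rest with
  | nil => intro acc c n; simp [pvRle]
  | cons d rest ih =>
    intro acc c n
    by_cases hc : d = c
    · subst hc
      simpa only [List.foldl_cons, pvRle, beq_self_eq_true, if_true] using ih acc d (n + 1)
    · have hb : (d == c) = false := by simp [hc]
      simp only [List.foldl_cons, pvRle, hb, Bool.false_eq_true, if_false]
      rw [ih (acc ++ [pvFmt c n]) d 1, List.append_assoc]
      simp

-- pvRle with pending count n equals one token absorbing the current run, then pvRuns of the rest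
theorem pvRle_eq_runs (rest : List Char) : ∀ (c : Char) (n : Int),
    pvRle c n rest
      = pvFmt c (n + (rest.takeWhile (· == c)).length) :: pvRuns (rest.dropWhile (· == c)) := by
  induction rest with
  | nil => intro c n; simp [pvRle, pvRuns]
  | cons d rest ih =>
    intro c n
    by_cases hc : d = c
    · subst hc
      simp only [pvRle, List.takeWhile_cons, List.dropWhile_cons, beq_self_eq_true, if_true]
      rw [ih d (n + 1)]
      congr 2
      simp only [List.length_cons]
      push_cast
      ring
    · have hb : (d == c) = false := by simp [hc]
      simp only [pvRle, List.takeWhile_cons, List.dropWhile_cons, hb, Bool.false_eq_true, if_false]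
      rw [ih d 1]
      simp [pvRuns]

-- ===== VERDICT (by name: the statement is the Claim_ definition above) =====
theorem matchline_to_cigar_py_spec : Claim_equal_matchline_to_cigar_py := by
  intro m _ hpre
  unfold Spec_matchline_to_cigar_py matchline_to_cigar_py matchline_to_cigar_py_alt
  cases hl : m.toList with
  | nil =>
    exact absurd (String.toList_inj.mp (by simp [hl])) hpre
  | cons c0 rest =>
    simp only [List.foldl_cons, beq_self_eq_true, if_true]
    have h1 := pvFold_eq rest [] c0 1
    simp only [] at h1
    rw [show ((0 : Int) + 1) = 1 by ring, h1, pvRle_eq_runs rest c0 1, List.nil_append]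
    have : pvRuns (c0 :: rest)
        = pvFmt c0 (1 + ((rest.takeWhile (· == c0)).length : Int)) :: pvRuns (rest.dropWhile (· == c0)) := by
      simp [pvRuns]
    rw [this]
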